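-- pv_equiv track=rewrite | github.com/Tanmay53/cohort_3 | submissions/sm_105_ashish/week_14/day_3/brick_wall.py | brick_wall
-- ===== SOURCE A (Python) =====
-- def brick_wall(N):
--     # my_arr = [2,6,10,14,18,22,24,28,32,36,40,44]
--     my_arr = range(2,N*4-3,4)
--     final_wall = list()
--     for i in range(N):
--         layer = list()
--         if i%2 == 1:
--             for j in range(N*4-3):
--                 if j%4 == 0:
--                     layer.append('|')
--                 else:
--                     layer.append('_')
--             final_wall.append(''.join(layer))
--             layer = list()
--         else:
--             layer = list()
--             for j in range(N*4-3):
--                 if j in my_arr: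
--                     layer.append('|')
--                 else:
--                     layer.append('_')
--             final_wall.append(''.join(layer))
--             layer = list()
--     result =''
--     for x in final_wall:
--         result += x
--         result += "\n"
--     return result
-- ===== SOURCE B (Python) =====
-- def brick_wall(N):
--     odd_line = ('|___' * N)[:N * 4 - 3]
--     even_line = ('__|_' * N)[:N * 4 - 3]
--     return ''.join((odd_line if i % 2 == 1 else even_line) + '\n' for i in range(N))
-- ===== Notes on version B (the rewrite author's own statement) =====
-- stated objective: simpler
-- what changed: B builds each of the two line patterns once in closed form by repeating a fixed block and slicing it to the row length, then joins the per-row lines, instead of A's per-character inner loops with a range-membership test per character.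
import Mathlib
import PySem

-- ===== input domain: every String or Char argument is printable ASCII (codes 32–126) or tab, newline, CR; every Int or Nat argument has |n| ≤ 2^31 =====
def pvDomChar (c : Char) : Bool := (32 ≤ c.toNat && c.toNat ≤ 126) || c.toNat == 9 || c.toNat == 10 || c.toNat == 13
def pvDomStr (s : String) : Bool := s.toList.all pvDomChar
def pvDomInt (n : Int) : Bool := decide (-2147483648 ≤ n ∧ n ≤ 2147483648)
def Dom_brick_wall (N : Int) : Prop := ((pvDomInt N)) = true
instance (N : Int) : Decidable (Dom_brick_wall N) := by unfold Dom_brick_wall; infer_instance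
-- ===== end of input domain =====

-- B builds the two line patterns in closed form (block repetition + slice) instead of A's
-- per-character loops; same return value; a timing run measured B faster (constant factor).
-- Strings are handled as List Char and wrapped with String.ofList at the end;
-- ''.join of a list of single-character strings is exactly the character list.

-- ===== PORT A =====
def brick_wall (N : Int) : String :=
  let my_arr := PySem.List.pyRange 2 (N*4-3) 4
  let final_wall : List (List Char) :=
    (PySem.List.pyRange 0 N 1).foldl (fun fw i =>
      if PySem.Int.mod i 2 == 1 then
        fw ++ [(PySem.List.pyRange 0 (N*4-3) 1).foldl
          (fun layer j => layer ++ [if PySem.Int.mod j 4 == 0 then '|' else '_']) ([] : List Char)]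
      else
        fw ++ [(PySem.List.pyRange 0 (N*4-3) 1).foldl
          (fun layer j => layer ++ [if my_arr.contains j then '|' else '_']) ([] : List Char)]) []
  String.ofList (final_wall.foldl (fun r x => r ++ x ++ ['\n']) [])

-- ===== PORT B =====
-- '|___' * N is (List.replicate N.toNat pat).flatten; [:N*4-3] is PySem.List.slice;
-- ''.join over the generator is flatten of the mapped list.
def brick_wall_alt (N : Int) : String :=
  let odd_line := PySem.List.slice ((List.replicate N.toNat ("|___".toList)).flatten) none (some (N*4-3))
  let even_line := PySem.List.slice ((List.replicate N.toNat ("__|_".toList)).flatten) none (some (N*4-3))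
  String.ofList (((PySem.List.pyRange 0 N 1).map
    (fun i => (if PySem.Int.mod i 2 == 1 then odd_line else even_line) ++ ['\n'])).flatten)

-- ===== PRECONDITION & SPEC =====
def Spec_brick_wall (N : Int) (out : String) : Prop := out = brick_wall_alt N
instance (N : Int) (out : String) : Decidable (Spec_brick_wall N out) := by unfold Spec_brick_wall; infer_instance

-- ===== CLAIM (what is proved, stated in full; the proofs are below) =====
def Claim_equal_brick_wall : Prop := ∀ (N : Int), Dom_brick_wall N → Spec_brick_wall N (brick_wall N)

-- ===== LEMMAS AND PROOFS =====

theorem foldl_snoc {α β : Type} (f : α → β) (xs : List α) (acc : List β) :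
    xs.foldl (fun acc x => acc ++ [f x]) acc = acc ++ xs.map f := by
  induction xs generalizing acc with
  | nil => simp
  | cons a t ih => simp [ih]

theorem foldl_join (ls : List (List Char)) (acc : List Char) :
    ls.foldl (fun r x => r ++ x ++ ['\n']) acc = acc ++ (ls.map (fun x => x ++ ['\n'])).flatten := by
  induction ls generalizing acc with
  | nil => simp
  | cons a t ih => simp

theorem foldl_snoc_ite {α β : Type} (c : α → Bool) (y z : β) (xs : List α) :
    xs.foldl (fun acc x => if c x then acc ++ [y] else acc ++ [z]) ([] : List β) =
      xs.map (fun x => if c x then y else z) := by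
  have h : (fun (acc : List β) x => if c x then acc ++ [y] else acc ++ [z]) =
      fun acc x => acc ++ [if c x then y else z] := by
    funext acc x; split <;> rfl
  rw [h, foldl_snoc]
  rfl

theorem get?_flat_rep {α : Type} (pat : List α) (hp : pat.length = 4) (n k : Nat)
    (hk : k < 4 * n) : ((List.replicate n pat).flatten)[k]? = pat[k % 4]? := by
  induction n generalizing k with
  | zero => omega
  | succ m ih =>
    rw [List.replicate_succ, List.flatten_cons]
    by_cases h4 : k < 4
    · rw [List.getElem?_append_left (by omega), Nat.mod_eq_of_lt h4]
    · rw [List.getElem?_append_right (by omega), hp, ih (k - 4) (by omega)]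
      congr 1
      omega

theorem fmod_natCast_four (k : Nat) : PySem.Int.mod (k : Int) 4 = ((k % 4 : Nat) : Int) := by
  show Int.fmod _ _ = _
  rw [Int.fmod_eq_emod]
  rw [if_pos (Or.inl (by norm_num))]
  omega

theorem line_odd_eq (N : Int) (h1 : 1 ≤ N) :
    PySem.List.slice ((List.replicate N.toNat ("|___".toList)).flatten) none (some (N*4-3)) =
      (PySem.List.pyRange 0 (N*4-3) 1).map
        (fun j => if PySem.Int.mod j 4 == 0 then '|' else '_') := by
  rw [PySem.List.slice_to _ (by omega)]
  apply List.ext_getElem?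
  intro k
  by_cases hk : k < (N*4-3).toNat
  · rw [List.getElem?_take_of_lt (by omega),
      get?_flat_rep _ (by decide) _ _ (by omega),
      List.getElem?_map, PySem.List.getElem?_pyRange_one, if_pos (by omega)]
    simp only [Option.map_some, zero_add, fmod_natCast_four]
    have hr : k % 4 < 4 := Nat.mod_lt _ (by norm_num)
    set r := k % 4 with hrdef
    interval_cases r <;> simp
  · rw [List.getElem?_eq_none (by simp; omega),
      List.getElem?_eq_none (by simp [PySem.List.length_pyRange_one]; omega)]

theorem line_even_eq (N : Int) (h1 : 1 ≤ N) :
    PySem.List.slice ((List.replicate N.toNat ("__|_".toList)).flatten) none (some (N*4-3)) =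
      (PySem.List.pyRange 0 (N*4-3) 1).map
        (fun j => if (PySem.List.pyRange 2 (N*4-3) 4).contains j then '|' else '_') := by
  rw [PySem.List.slice_to _ (by omega)]
  apply List.ext_getElem?
  intro k
  by_cases hk : k < (N*4-3).toNat
  · rw [List.getElem?_take_of_lt (by omega),
      get?_flat_rep _ (by decide) _ _ (by omega),
      List.getElem?_map, PySem.List.getElem?_pyRange_one, if_pos (by omega)]
    simp only [Option.map_some, zero_add]
    have hcon : (PySem.List.pyRange 2 (N*4-3) 4).contains (k : Int) = decide (k % 4 = 2) := by
      by_cases h2 : k % 4 = 2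
      · have hm : (k : Int) ∈ PySem.List.pyRange 2 (N*4-3) 4 := by
          rw [PySem.List.mem_pyRange_iff_of_pos (by norm_num)]
          exact ⟨by omega, by omega, by omega⟩
        simp [h2, hm]
      · have hm : (k : Int) ∉ PySem.List.pyRange 2 (N*4-3) 4 := by
          rw [PySem.List.mem_pyRange_iff_of_pos (by norm_num)]
          rintro ⟨ha, hb, hd⟩
          omega
        simp [h2, hm]
    rw [hcon]
    have hr : k % 4 < 4 := Nat.mod_lt _ (by norm_num)
    set r := k % 4 with hrdef
    interval_cases r <;> simp
  · rw [List.getElem?_eq_none (by simp; omega),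
      List.getElem?_eq_none (by simp [PySem.List.length_pyRange_one]; omega)]

-- ===== VERDICT (by name: the statement is the Claim_ definition above) =====
theorem brick_wall_spec : Claim_equal_brick_wall := by
  unfold Claim_equal_brick_wall
  intro N _
  show brick_wall N = brick_wall_alt N
  unfold brick_wall brick_wall_alt
  by_cases h1 : 1 ≤ N
  · simp only
    rw [foldl_snoc (fun j => if PySem.Int.mod j 4 == 0 then '|' else '_'),
        foldl_snoc (fun j => if (PySem.List.pyRange 2 (N*4-3) 4).contains j then '|' else '_'),
        List.nil_append, List.nil_append,
        foldl_snoc_ite,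
        foldl_join, List.nil_append, List.map_map,
        line_odd_eq N h1, line_even_eq N h1]
    congr 1
  · have hz : PySem.List.pyRange 0 N 1 = [] := PySem.List.pyRange_one_eq_nil (by omega)
    simp [hz]
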